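-- pv_equiv track=rewrite | github.com/richardowijaya/general-service-kubespray | app/test_main.py | extract_prefix
-- ===== SOURCE A (Python) =====
-- def extract_prefix(controller_name):
--     words = []
--     start = 0
--     for i in range(1, len(controller_name)):
--         if controller_name[i].isupper():
--             words.append(controller_name[start:i].lower())
--             start = i
--     words.append(controller_name[start:].lower())
--     return '-'.join(words)
-- ===== SOURCE B (Python) =====
-- def extract_prefix(controller_name):
--     out = []
--     for i, c in enumerate(controller_name):
--         if i > 0 and c.isupper():
--             out.append('-')
--         out.append(c.lower())
--     return ''.join(out)
-- ===== Notes on version B (the rewrite author's own statement) =====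
-- stated objective: idiomatic
-- what changed: Replaces segment-slicing with a start index (slice each word out, lower it, join at the end) by a single separator-insertion pass over enumerate(name): emit a hyphen before every non-initial uppercase char and the lowercased char itself.
import Mathlib
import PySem

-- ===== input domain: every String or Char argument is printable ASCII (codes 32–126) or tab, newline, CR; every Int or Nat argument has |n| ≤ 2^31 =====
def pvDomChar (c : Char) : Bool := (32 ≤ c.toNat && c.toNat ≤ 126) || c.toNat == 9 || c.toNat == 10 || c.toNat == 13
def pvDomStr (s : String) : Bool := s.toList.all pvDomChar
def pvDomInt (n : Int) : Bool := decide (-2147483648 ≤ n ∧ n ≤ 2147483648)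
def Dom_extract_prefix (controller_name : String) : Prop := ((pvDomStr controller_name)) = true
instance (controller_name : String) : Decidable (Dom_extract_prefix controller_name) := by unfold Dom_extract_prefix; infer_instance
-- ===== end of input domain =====

-- B replaces A's segment-slicing pass (start index, slice+lower each word, join) by a single
-- separator-insertion pass over enumerate: for each char emit a hyphen before a non-initial uppercase
-- letter and the lowercased char itself (objective: more idiomatic, same O(n) cost).


-- ===== PORT A =====
-- words = []; start = 0; for i in range(1, len(s)): if s[i].isupper(): words.append(s[start:i].lower()); start = i
-- words.append(s[start:].lower()); return '-'.join(words)
def extract_prefix (controller_name : String) : String :=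
  let cs := controller_name.toList
  let st : List (List Char) × Int :=
    (PySem.List.pyRange 1 (PySem.Chars.len cs) 1).foldl
      (fun acc i =>
        if PySem.Chars.isupper (PySem.List.pyGetD cs i ' ') then
          (acc.1 ++ [PySem.Chars.lower (PySem.List.slice cs (some acc.2) (some i))], i)
        else acc)
      ([], 0)
  String.ofList
    (PySem.Chars.join ['-']
      (st.1 ++ [PySem.Chars.lower (PySem.List.slice cs (some st.2) none)]))

-- ===== PORT B =====
-- out = []; for i, c in enumerate(s): if i > 0 and c.isupper(): out.append('-'); out.append(c.lower())
-- return ''.join(out)   (each appended piece is one char, so out is kept as a char list)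
def extract_prefix_alt (controller_name : String) : String :=
  let out :=
    (PySem.List.enumerate controller_name.toList 0).foldl
      (fun acc p =>
        (if 0 < p.1 && PySem.Chars.isupper p.2 then acc ++ ['-'] else acc)
          ++ [PySem.Chars.lowerChar p.2])
      []
  String.ofList out

-- ===== PRECONDITION & SPEC =====
def Spec_extract_prefix (controller_name : String) (out : String) : Prop := out = extract_prefix_alt controller_name
instance (controller_name : String) (out : String) : Decidable (Spec_extract_prefix controller_name out) := by unfold Spec_extract_prefix; infer_instance

-- ===== CLAIM (what is proved, stated in full; the proofs are below) =====
def Claim_equal_extract_prefix : Prop := ∀ (controller_name : String), Dom_extract_prefix controller_name → Spec_extract_prefix controller_name (extract_prefix controller_name)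

-- ===== LEMMAS AND PROOFS =====

-- the per-char expansion both programs compute for all chars after the first
def pvExpand (t : List Char) : List Char :=
  t.flatMap (fun c => if PySem.Chars.isupper c then ['-', PySem.Chars.lowerChar c] else [PySem.Chars.lowerChar c])

theorem pvExpand_nil : pvExpand [] = [] := rfl

theorem pvExpand_cons (c : Char) (t : List Char) :
    pvExpand (c :: t) =
      (if PySem.Chars.isupper c then ['-', PySem.Chars.lowerChar c] else [PySem.Chars.lowerChar c]) ++ pvExpand t := by
  simp [pvExpand]

-- B's fold over the tail (all indices positive) is acc ++ pvExpand t
theorem pvB_tail (t : List Char) : ∀ (k : Int) (acc : List Char), 0 < k →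
    (PySem.List.enumerate t k).foldl
      (fun acc p =>
        (if 0 < p.1 && PySem.Chars.isupper p.2 then acc ++ ['-'] else acc)
          ++ [PySem.Chars.lowerChar p.2]) acc = acc ++ pvExpand t := by
  induction t with
  | nil => intro k acc _; simp [PySem.List.enumerate_nil, pvExpand]
  | cons c t ih =>
    intro k acc hk
    rw [PySem.List.enumerate_cons, List.foldl_cons, ih (k + 1) _ (by omega), pvExpand_cons]
    by_cases h : PySem.Chars.isupper c <;> simp [h, hk]

theorem pvB_char (cs : List Char) :
    (PySem.List.enumerate cs 0).foldl
      (fun acc p =>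
        (if 0 < p.1 && PySem.Chars.isupper p.2 then acc ++ ['-'] else acc)
          ++ [PySem.Chars.lowerChar p.2]) [] =
      match cs with
      | [] => []
      | c :: t => PySem.Chars.lowerChar c :: pvExpand t := by
  cases cs with
  | nil => simp [PySem.List.enumerate_nil]
  | cons c t =>
    rw [PySem.List.enumerate_cons, List.foldl_cons, pvB_tail t (0 + 1) _ (by omega)]
    simp

-- join with '-' merges two final words into one word carrying an explicit '-'
theorem pvJoin_cons_of_ne_nil (w : List Char) (rest : List (List Char)) (h : rest ≠ []) :
    PySem.Chars.join ['-'] (w :: rest) = w ++ ['-'] ++ PySem.Chars.join ['-'] rest := by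
  cases rest with
  | nil => exact absurd rfl h
  | cons q r => exact PySem.Chars.join_cons_cons _ _ _ _

theorem pvJoin_two (ws : List (List Char)) (a b : List Char) :
    PySem.Chars.join ['-'] (ws ++ [a, b]) = PySem.Chars.join ['-'] (ws ++ [a ++ ['-'] ++ b]) := by
  induction ws with
  | nil =>
    rw [List.nil_append, List.nil_append, PySem.Chars.join_cons_cons,
      PySem.Chars.join_singleton, PySem.Chars.join_singleton]
  | cons w ws ih =>
    rw [List.cons_append, List.cons_append,
      pvJoin_cons_of_ne_nil w _ (by simp), pvJoin_cons_of_ne_nil w _ (by simp), ih]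

-- the invariant of A's index loop: from index j with segment start s, the joined result
-- equals the already-closed words followed by the lowered open segment and pvExpand of the rest
theorem pvA_main (cs : List Char) : ∀ (d j s : Nat) (ws : List (List Char)),
    j + d = cs.length → s ≤ j →
    (let r := (PySem.List.pyRange (j : Int) (cs.length : Int) 1).foldl
        (fun acc i =>
          if PySem.Chars.isupper (PySem.List.pyGetD cs i ' ') then
            (acc.1 ++ [PySem.Chars.lower (PySem.List.slice cs (some acc.2) (some i))], i)
          else acc) (ws, (s : Int));
      PySem.Chars.join ['-'] (r.1 ++ [PySem.Chars.lower (PySem.List.slice cs (some r.2) none)]))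
      = PySem.Chars.join ['-']
          (ws ++ [PySem.Chars.lower (PySem.List.slice cs (some (s : Int)) (some (j : Int))) ++ pvExpand (cs.drop j)]) := by
  intro d
  induction d with
  | zero =>
    intro j s ws hj hs
    have hjl : j = cs.length := by omega
    subst hjl
    rw [PySem.List.pyRange_one_eq_nil (le_refl _)]
    simp only [List.foldl_nil]
    rw [PySem.List.slice_from_natCast, PySem.List.slice_natCast, List.drop_length,
      pvExpand_nil, List.append_nil, List.take_of_length_le (by simp)]
  | succ d ih =>
    intro j s ws hj hs
    have hjlt : j < cs.length := by omega
    have hstep : PySem.List.pyRange (j : Int) (cs.length : Int) 1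
        = (j : Int) :: PySem.List.pyRange ((j : Int) + 1) (cs.length : Int) 1 :=
      PySem.List.pyRange_one_cons (by exact_mod_cast hjlt)
    have hcast : ((j : Int) + 1) = ((j + 1 : Nat) : Int) := by push_cast; ring
    have hget : PySem.List.pyGetD cs ((j : Nat) : Int) ' ' = cs[j] := by
      rw [PySem.List.pyGetD_natCast, List.getD_eq_getElem cs ' ' hjlt]
    have hdropj : cs.drop j = cs[j] :: cs.drop (j + 1) := List.drop_eq_getElem_cons hjlt
    have hsliceext : PySem.List.slice cs (some (s : Int)) (some ((j + 1 : Nat) : Int))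
        = PySem.List.slice cs (some (s : Int)) (some (j : Int)) ++ [cs[j]] := by
      rw [PySem.List.slice_natCast, PySem.List.slice_natCast]
      have h1 : j + 1 - s = (j - s) + 1 := by omega
      rw [h1, List.take_add_one]
      have h2 : (cs.drop s)[j - s]? = some cs[j] := by
        rw [List.getElem?_drop]
        have : s + (j - s) = j := by omega
        rw [this, List.getElem?_eq_getElem hjlt]
      rw [h2]
      rfl
    rw [hstep, List.foldl_cons]
    by_cases hu : PySem.Chars.isupper cs[j]
    · simp only [hget, hu, if_pos]
      rw [hcast]
      rw [ih (j + 1) j (ws ++ [PySem.Chars.lower (PySem.List.slice cs (some (s : Int)) (some (j : Int)))]) (by omega) (by omega)]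
      have hseg : PySem.List.slice cs (some ((j : Nat) : Int)) (some ((j + 1 : Nat) : Int)) = [cs[j]] := by
        rw [PySem.List.slice_natCast]
        have h1 : j + 1 - j = 1 := by omega
        rw [h1, hdropj]
        rfl
      rw [hseg, List.append_assoc, List.singleton_append, pvJoin_two]
      rw [hdropj, pvExpand_cons, if_pos hu]
      simp [PySem.Chars.lower]
    · simp only [hget, hu, if_neg, Bool.not_eq_true]
      rw [hcast, ih (j + 1) s ws (by omega) (by omega)]
      rw [hsliceext, hdropj, pvExpand_cons, if_neg hu]
      simp [PySem.Chars.lower]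

-- ===== VERDICT (by name: the statement is the Claim_ definition above) =====
theorem extract_prefix_spec : Claim_equal_extract_prefix := by
  intro s _
  unfold Spec_extract_prefix extract_prefix extract_prefix_alt
  rw [pvB_char]
  cases hcs : s.toList with
  | nil => simp [PySem.List.pyRange_one_eq_nil, PySem.Chars.join_singleton, PySem.Chars.lower]
  | cons c t =>
    simp only [PySem.Chars.len_eq]
    have := pvA_main (c :: t) t.length 1 0 [] (by simp only [List.length_cons]; omega) (by omega)
    simp only [List.nil_append] at this
    push_cast at this
    rw [this, PySem.Chars.join_singleton]
    have hsl : PySem.List.slice (c :: t) (some (0 : Int)) (some (1 : Int)) = [c] := by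
      rw [PySem.List.slice_zero_start, PySem.List.slice_to]
      · rfl
      · norm_num
    rw [hsl]
    simp [PySem.Chars.lower]
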